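-- pv_equiv track=rewrite | github.com/Umar-Eh/Cryptoanalysis-of-Vigenere-Cipher | kasiskiMethod.py | commonFactors
-- ===== SOURCE A (Python) =====
-- def findFactors(num):
-- 	factors = []
-- 	for i in range(3, num + 1):
-- 		if ((num % i) == 0 and i < 8):
-- 			factors.append(i)
--
-- 	return factors
--
-- def commonFactors(distances):
-- 	commonFactors = []
--
-- 	for distance in distances:
-- 		distanceFactors = findFactors(distance)
--
-- 		for factor in distanceFactors:
-- 			if (factor not in commonFactors and factor > 2 and factor < 8):
-- 				commonFactors.append(factor)
-- 	commonFactors.sort()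
-- 	return commonFactors
-- ===== SOURCE B (Python) =====
-- def commonFactors(distances):
--     # Factors outer, distances inner: result is sorted and deduplicated by construction.
--     return [f for f in (3, 4, 5, 6, 7)
--             if any(d > 0 and d % f == 0 for d in distances)]
-- ===== Notes on version B (the rewrite author's own statement) =====
-- stated objective: faster
-- what changed: Inverts the loop nesting: instead of trial-dividing each distance by every i in range(3, d+1) then deduplicating with a membership scan and sorting, B loops over the fixed candidate factors 3..7 and keeps each one that divides some positive distance, so the result is sorted and deduplicated by construction.
import Mathlib
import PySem

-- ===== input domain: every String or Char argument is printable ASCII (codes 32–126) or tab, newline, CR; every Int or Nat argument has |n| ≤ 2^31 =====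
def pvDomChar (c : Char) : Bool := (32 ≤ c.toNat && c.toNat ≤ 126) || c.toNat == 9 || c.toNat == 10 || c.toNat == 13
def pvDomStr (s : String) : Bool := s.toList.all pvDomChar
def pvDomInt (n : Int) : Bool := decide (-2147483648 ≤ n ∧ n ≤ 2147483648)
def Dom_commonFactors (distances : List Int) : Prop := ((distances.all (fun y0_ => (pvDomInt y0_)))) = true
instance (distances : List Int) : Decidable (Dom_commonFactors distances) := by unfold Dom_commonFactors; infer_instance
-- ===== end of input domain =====

-- B inverts the loop nesting (candidate factors 3..7 outer, distances inner), so the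
-- result is sorted and deduplicated by construction; no factoring, no membership scan, no sort.

-- ===== PORT A =====
def findFactors (num : Int) : List Int :=
  (PySem.List.pyRange 3 (num + 1) 1).foldl
    (fun factors i =>
      if (PySem.Int.mod num i == 0) && decide (i < 8) then factors ++ [i] else factors) []

def commonFactors (distances : List Int) : List Int :=
  let cf := distances.foldl
    (fun cf distance =>
      (findFactors distance).foldl
        (fun cf factor =>
          if factor ∉ cf ∧ factor > 2 ∧ factor < 8 then cf ++ [factor] else cf) cf) []
  PySem.List.sorted cf (fun x => x) false

-- ===== PORT B =====
def commonFactors_alt (distances : List Int) : List Int :=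
  [3, 4, 5, 6, 7].filter (fun f => distances.any (fun d => decide (d > 0) && decide (PySem.Int.mod d f = 0)))

-- ===== PRECONDITION & SPEC =====
def Spec_commonFactors (distances : List Int) (out : List Int) : Prop := out = commonFactors_alt distances
instance (distances : List Int) (out : List Int) : Decidable (Spec_commonFactors distances out) := by unfold Spec_commonFactors; infer_instance

-- ===== CLAIM (what is proved, stated in full; the proofs are below) =====
def Claim_equal_commonFactors : Prop := ∀ (distances : List Int), Dom_commonFactors distances → Spec_commonFactors distances (commonFactors distances)

-- ===== LEMMAS AND PROOFS =====

-- A factor in 3..7 is collected from a distance d iff d is positive and divisible by it.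
theorem mem_findFactors (d x : Int) :
    (x ∈ findFactors d ∧ 2 < x ∧ x < 8) ↔ (3 ≤ x ∧ x < 8 ∧ 0 < d ∧ x ∣ d) := by
  unfold findFactors
  rw [PySem.List.foldl_append_if]
  simp only [List.nil_append, List.mem_map, List.mem_filter, PySem.List.mem_pyRange_one,
    Bool.and_eq_true, beq_iff_eq, PySem.Int.mod_eq_zero_iff_dvd, decide_eq_true_eq]
  constructor
  · rintro ⟨⟨i, ⟨⟨h3, _⟩, hdvd, _⟩, rfl⟩, _, h8⟩
    exact ⟨h3, h8, by omega, hdvd⟩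
  · rintro ⟨h3, h8, hd, hdvd⟩
    have hle : x ≤ d := Int.le_of_dvd hd hdvd
    exact ⟨⟨x, ⟨⟨h3, by omega⟩, hdvd, by omega⟩, rfl⟩, by omega, h8⟩

-- the inner loop over one distance's factor list
theorem inner_loop (fs : List Int) (acc : List Int) (hnd : acc.Nodup) :
    (fs.foldl (fun cf factor =>
        if factor ∉ cf ∧ factor > 2 ∧ factor < 8 then cf ++ [factor] else cf) acc).Nodup ∧
    (∀ x, x ∈ fs.foldl (fun cf factor =>
        if factor ∉ cf ∧ factor > 2 ∧ factor < 8 then cf ++ [factor] else cf) acc ↔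
      x ∈ acc ∨ (x ∈ fs ∧ 2 < x ∧ x < 8)) := by
  induction fs generalizing acc with
  | nil => simpa using hnd
  | cons f t ih =>
    simp only [List.foldl_cons]
    by_cases h : f ∉ acc ∧ f > 2 ∧ f < 8
    · rw [if_pos h]
      have hnd' : (acc ++ [f]).Nodup := by
        rw [List.nodup_append]
        refine ⟨hnd, List.nodup_singleton f, ?_⟩
        intro a ha b hb
        simp only [List.mem_singleton] at hb
        subst hb
        exact fun e => h.1 (e ▸ ha)
      obtain ⟨hn, hm⟩ := ih (acc ++ [f]) hnd'
      refine ⟨hn, fun x => ?_⟩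
      rw [hm x]
      simp only [List.mem_append, List.mem_cons, List.not_mem_nil, or_false]
      obtain ⟨-, h2, h8⟩ := h
      constructor
      · rintro ((hx | rfl) | ⟨hx, hb2, hb8⟩)
        · exact Or.inl hx
        · exact Or.inr ⟨Or.inl rfl, h2, h8⟩
        · exact Or.inr ⟨Or.inr hx, hb2, hb8⟩
      · rintro (hx | ⟨(rfl | hx), hb2, hb8⟩)
        · exact Or.inl (Or.inl hx)
        · exact Or.inl (Or.inr rfl)
        · exact Or.inr ⟨hx, hb2, hb8⟩
    · rw [if_neg h]
      obtain ⟨hn, hm⟩ := ih acc hnd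
      refine ⟨hn, fun x => ?_⟩
      rw [hm x]
      simp only [List.mem_cons]
      constructor
      · rintro (hx | ⟨hx, hb2, hb8⟩)
        · exact Or.inl hx
        · exact Or.inr ⟨Or.inr hx, hb2, hb8⟩
      · rintro (hx | ⟨(hxf | hx), hb2, hb8⟩)
        · exact Or.inl hx
        · -- the guard failed for f; as the bounds hold, f must already be in acc
          by_cases hf : f ∈ acc
          · exact Or.inl (hxf ▸ hf)
          · exact absurd ⟨hf, hxf ▸ hb2, hxf ▸ hb8⟩ h
        · exact Or.inr ⟨hx, hb2, hb8⟩

-- the outer loop over distances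
theorem outer_loop (ds : List Int) (acc : List Int) (hnd : acc.Nodup) :
    (ds.foldl (fun cf distance =>
        (findFactors distance).foldl
          (fun cf factor =>
            if factor ∉ cf ∧ factor > 2 ∧ factor < 8 then cf ++ [factor] else cf) cf) acc).Nodup ∧
    (∀ x, x ∈ ds.foldl (fun cf distance =>
        (findFactors distance).foldl
          (fun cf factor =>
            if factor ∉ cf ∧ factor > 2 ∧ factor < 8 then cf ++ [factor] else cf) cf) acc ↔
      x ∈ acc ∨ ∃ d ∈ ds, x ∈ findFactors d ∧ 2 < x ∧ x < 8) := by
  induction ds generalizing acc with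
  | nil => simpa using hnd
  | cons d t ih =>
    simp only [List.foldl_cons]
    obtain ⟨hn1, hm1⟩ := inner_loop (findFactors d) acc hnd
    obtain ⟨hn, hm⟩ := ih _ hn1
    refine ⟨hn, fun x => ?_⟩
    rw [hm x, hm1 x]
    simp only [List.mem_cons]
    constructor
    · rintro ((hx | ⟨hx, h2, h8⟩) | ⟨e, he, hx⟩)
      · exact Or.inl hx
      · exact Or.inr ⟨d, Or.inl rfl, hx, h2, h8⟩
      · exact Or.inr ⟨e, Or.inr he, hx⟩
    · rintro (hx | ⟨e, (rfl | he), hx⟩)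
      · exact Or.inl (Or.inl hx)
      · exact Or.inl (Or.inr hx)
      · exact Or.inr ⟨e, he, hx⟩

-- B's list is strictly increasing (a filter of the strictly increasing [3,4,5,6,7])
theorem alt_pairwise (distances : List Int) :
    (commonFactors_alt distances).Pairwise (· < ·) := by
  unfold commonFactors_alt
  exact List.Pairwise.sublist List.filter_sublist (by decide)

-- membership in B's result
theorem mem_alt (distances : List Int) (x : Int) :
    x ∈ commonFactors_alt distances ↔
      (3 ≤ x ∧ x < 8 ∧ ∃ d ∈ distances, 0 < d ∧ x ∣ d) := by
  unfold commonFactors_alt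
  simp only [List.mem_filter, List.any_eq_true, Bool.and_eq_true, decide_eq_true_eq,
    PySem.Int.mod_eq_zero_iff_dvd]
  constructor
  · rintro ⟨hx, d, hd, hpos, hdvd⟩
    refine ⟨?_, ?_, d, hd, hpos, hdvd⟩ <;> (fin_cases hx <;> norm_num)
  · rintro ⟨h3, h8, d, hd, hpos, hdvd⟩
    refine ⟨?_, d, hd, hpos, hdvd⟩
    have : x = 3 ∨ x = 4 ∨ x = 5 ∨ x = 6 ∨ x = 7 := by omega
    rcases this with rfl | rfl | rfl | rfl | rfl <;> decide

-- ===== VERDICT (by name: the statement is the Claim_ definition above) =====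
theorem commonFactors_spec : Claim_equal_commonFactors := by
  intro distances _
  unfold Spec_commonFactors commonFactors
  obtain ⟨hnd, hm⟩ := outer_loop distances [] List.nodup_nil
  set L := distances.foldl _ [] with hL
  have hmem : ∀ x, x ∈ L ↔ x ∈ commonFactors_alt distances := by
    intro x
    rw [hm x, mem_alt]
    simp only [List.not_mem_nil, false_or]
    constructor
    · rintro ⟨d, hd, hx⟩
      obtain ⟨h3, h8, hpos, hdvd⟩ := (mem_findFactors d x).mp hx
      exact ⟨h3, h8, d, hd, hpos, hdvd⟩
    · rintro ⟨h3, h8, d, hd, hpos, hdvd⟩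
      exact ⟨d, hd, (mem_findFactors d x).mpr ⟨h3, h8, hpos, hdvd⟩⟩
  have hndalt : (commonFactors_alt distances).Nodup :=
    (alt_pairwise distances).imp fun h => ne_of_lt h
  have hperm : (commonFactors_alt distances).Perm L := by
    rw [List.perm_ext_iff_of_nodup hndalt hnd]
    intro x; rw [hmem x]
  exact PySem.List.sorted_eq_of_perm_of_pairwise_lt L (commonFactors_alt distances)
    (fun x => x) hperm (alt_pairwise distances)
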